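-- pv_equiv track=rewrite | github.com/26XINXIN/leedcode | 11_maxArea.py | newMaxArea
-- ===== SOURCE A (Python) =====
-- def newMaxArea(height):
--     """
--     :type height: List[int]
--     :rtype: int
--     """
--     maxa = 0
--     for i in range(len(height)):
--         h = height[i]
--         farest = len(height) - 1
--         while height[farest] < h:
--             farest -= 1
--         area = h * (farest - i)
--         maxa = (maxa if maxa > area else area)
--     return maxa
-- ===== SOURCE B (Python) =====
-- def newMaxArea(height):
--     n = len(height)
--     # suffix records: (height, index), rightmost first, heights strictly increasing
--     recs = []
--     for idx in range(n - 1, -1, -1):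
--         h = height[idx]
--         if not recs or h > recs[-1][0]:
--             recs.append((h, idx))
--     best = 0
--     for i, h in enumerate(height):
--         # binary search first record with height >= h (exists: i itself qualifies)
--         lo, hi = 0, len(recs) - 1
--         while lo < hi:
--             mid = (lo + hi) // 2
--             if recs[mid][0] >= h:
--                 hi = mid
--             else:
--                 lo = mid + 1
--         area = h * (recs[lo][1] - i)
--         best = area if area > best else best
--     return best
-- ===== Notes on version B (the rewrite author's own statement) =====
-- stated objective: faster
-- what changed: A rescans the list from the right for every element to find the rightmost index with height >= h; B precomputes the strictly-increasing list of suffix-record heights once and answers each element's query by binary search over it.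
import Mathlib
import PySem

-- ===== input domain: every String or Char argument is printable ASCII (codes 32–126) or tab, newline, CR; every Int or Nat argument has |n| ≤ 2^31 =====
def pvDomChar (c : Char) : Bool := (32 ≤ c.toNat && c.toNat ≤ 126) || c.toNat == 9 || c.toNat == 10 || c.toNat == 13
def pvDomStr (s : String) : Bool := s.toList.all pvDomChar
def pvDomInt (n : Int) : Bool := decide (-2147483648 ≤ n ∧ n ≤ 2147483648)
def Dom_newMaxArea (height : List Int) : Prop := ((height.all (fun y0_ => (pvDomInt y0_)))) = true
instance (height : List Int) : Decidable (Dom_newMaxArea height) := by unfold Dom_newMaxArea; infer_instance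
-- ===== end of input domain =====

-- B replaces A's per-element right-to-left rescan by suffix records + binary search (alternative algorithm).

-- ===== PORT A =====
-- the while loop 'while height[farest] < h: farest -= 1', scanning down from farest.
-- (Within newMaxArea the loop always stops at index ≥ i ≥ 0 because height[i] = h,
--  so the farest = 0 case with height[0] < h is unreachable; we return 0 there.)
def findFar (height : List Int) (h : Int) : Nat → Nat
  | 0 => 0
  | f + 1 => if height.getD (f + 1) 0 < h then findFar height h f else f + 1

def newMaxArea (height : List Int) : Int :=
  (List.range height.length).foldl (fun maxa i =>
    let h := height.getD i 0
    let farest := findFar height h (height.length - 1)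
    let area := h * ((farest : Int) - (i : Int))
    if maxa > area then maxa else area) 0

-- ===== PORT B =====
-- loop body of 'for idx in range(n-1,-1,-1): if not recs or h > recs[-1][0]: recs.append((h, idx))'
def stepRec (height : List Int) (recs : List (Int × Nat)) (idx : Nat) : List (Int × Nat) :=
  let h := height.getD idx 0
  if recs.getLast?.all (fun p => h > p.1) then recs ++ [(h, idx)] else recs

def buildRecs (height : List Int) : List (Int × Nat) :=
  (List.range height.length).reverse.foldl (stepRec height) []

-- the binary-search while loop of Source B ('fuel' = hi - lo only makes the loop
-- structurally total: each iteration shrinks hi - lo by at least one)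
def bsAux (recs : List (Int × Nat)) (h : Int) : Nat → Nat → Nat → Nat
  | 0, lo, _ => lo
  | fuel + 1, lo, hi =>
    if lo < hi then
      let mid := (lo + hi) / 2
      if h ≤ (recs.getD mid (0, 0)).1 then bsAux recs h fuel lo mid
      else bsAux recs h fuel (mid + 1) hi
    else lo

def bs (recs : List (Int × Nat)) (h : Int) (lo hi : Nat) : Nat :=
  bsAux recs h (hi - lo) lo hi

def newMaxArea_alt (height : List Int) : Int :=
  let recs := buildRecs height
  (PySem.List.enumerate height).foldl (fun best p =>
    let lo := bs recs p.2 0 (recs.length - 1)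
    let area := p.2 * (((recs.getD lo (0, 0)).2 : Int) - p.1)
    if area > best then area else best) 0

-- ===== PRECONDITION & SPEC =====
def Spec_newMaxArea (height : List Int) (out : Int) : Prop := out = newMaxArea_alt height
instance (height : List Int) (out : Int) : Decidable (Spec_newMaxArea height out) := by unfold Spec_newMaxArea; infer_instance

-- ===== CLAIM (what is proved, stated in full; the proofs are below) =====
def Claim_equal_newMaxArea : Prop := ∀ (height : List Int), Dom_newMaxArea height → Spec_newMaxArea height (newMaxArea height)

-- ===== LEMMAS AND PROOFS =====

-- reference: scan indices f, f-1, …, lo for the first j (from above) with h ≤ height[j]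
def scanOpt (height : List Int) (h : Int) (lo : Nat) : Nat → Option Nat
  | 0 => if h ≤ height.getD 0 0 then some 0 else none
  | f + 1 =>
    if h ≤ height.getD (f + 1) 0 then some (f + 1)
    else if lo = f + 1 then none else scanOpt height h lo f

-- linear search of the records list (first record with height ≥ h), the model of Source B's binary search
def linFind (recs : List (Int × Nat)) (h : Int) : Option Nat :=
  (recs.find? (fun p => decide (h ≤ p.1))).map (·.2)

def RecInv (height : List Int) (idx : Nat) (recs : List (Int × Nat)) : Prop :=
  (∀ h : Int, linFind recs h = scanOpt height h idx (height.length - 1))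
  ∧ recs.Pairwise (fun p q => p.1 < q.1)
  ∧ (∀ p ∈ recs, ∀ q, recs.getLast? = some q → p.1 ≤ q.1)

lemma scanOpt_findFar (height : List Int) (h : Int) :
    ∀ f r, scanOpt height h 0 f = some r → findFar height h f = r := by
  intro f
  induction f with
  | zero =>
    intro r hr
    simp only [scanOpt] at hr
    split at hr
    · cases hr; rfl
    · cases hr
  | succ f ih =>
    intro r hr
    simp only [scanOpt] at hr
    by_cases hc : h ≤ height.getD (f + 1) 0
    · simp only [if_pos hc] at hr
      cases hr
      simp only [findFar, if_neg (not_lt.mpr hc)]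
    · simp only [if_neg hc, if_neg (Nat.zero_ne_add_one f)] at hr
      simp only [findFar, if_pos (lt_of_not_ge hc)]
      exact ih r hr

lemma scanOpt_isSome (height : List Int) (h : Int) (i : Nat)
    (hh : h ≤ height.getD i 0) : ∀ f, i ≤ f → (scanOpt height h 0 f).isSome := by
  intro f
  induction f with
  | zero =>
    intro hif
    have : i = 0 := Nat.le_zero.mp hif
    subst this
    simp only [scanOpt, if_pos hh, Option.isSome_some]
  | succ f ih =>
    intro hif
    by_cases hc : h ≤ height.getD (f + 1) 0
    · simp only [scanOpt, if_pos hc, Option.isSome_some]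
    · have hi' : i ≤ f := by
        rcases Nat.lt_or_ge i (f + 1) with hlt | hge
        · omega
        · exfalso; have : i = f + 1 := by omega
          subst this; exact hc hh
      simp only [scanOpt, if_neg hc, if_neg (Nat.zero_ne_add_one f)]
      exact ih hi' 

lemma scanOpt_self (height : List Int) (h : Int) (f : Nat) :
    scanOpt height h f f = if h ≤ height.getD f 0 then some f else none := by
  cases f <;> simp [scanOpt]

lemma scanOpt_top (height : List Int) (h : Int) (lo f : Nat)
    (hh : h ≤ height.getD f 0) : scanOpt height h lo f = some f := by
  cases f <;> simp only [scanOpt, if_pos hh]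

lemma scanOpt_bottom (height : List Int) (h : Int) :
    ∀ f lo, lo < f →
      scanOpt height h lo f
        = (scanOpt height h (lo + 1) f).or (if h ≤ height.getD lo 0 then some lo else none) := by
  intro f
  induction f with
  | zero => intro lo hlo; omega
  | succ f ih =>
    intro lo hlo
    by_cases hc : h ≤ height.getD (f + 1) 0
    · simp only [scanOpt, if_pos hc, Option.some_or]
    · have hlone : lo ≠ f + 1 := by omega
      simp only [scanOpt, if_neg hc, if_neg hlone]
      by_cases hlf : lo = f
      · subst hlf
        rw [scanOpt_self]
        simp
      · have hlo' : lo < f := by omega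
        have hne' : lo + 1 ≠ f + 1 := by omega
        simp only [if_neg hne']
        exact ih lo hlo' 

lemma inv_base (height : List Int) (_hn : height.length ≠ 0) :
    RecInv height (height.length - 1) (stepRec height [] (height.length - 1)) := by
  have hstep : stepRec height [] (height.length - 1)
      = [(height.getD (height.length - 1) 0, height.length - 1)] := by
    simp [stepRec]
  rw [hstep]
  refine ⟨?_, by simp, by simp⟩
  intro h
  rw [scanOpt_self]
  by_cases hc : h ≤ height.getD (height.length - 1) 0
  · simp only [linFind, List.find?, decide_eq_true hc, Option.map_some, if_pos hc]
  · simp only [linFind, List.find?, decide_eq_false hc, Option.map_none, if_neg hc]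

lemma linFind_eq_none_iff (recs : List (Int × Nat)) (h : Int) :
    linFind recs h = none ↔ ∀ p ∈ recs, p.1 < h := by
  simp [linFind, List.find?_eq_none]

lemma inv_step (height : List Int) (idx : Nat) (recs : List (Int × Nat))
    (hidx : idx + 1 ≤ height.length - 1) (hInv : RecInv height (idx + 1) recs) :
    RecInv height idx (stepRec height recs idx) := by
  obtain ⟨hlin, hpw, hlast⟩ := hInv
  -- recs is nonempty: index length-1 is always found
  have hne : recs ≠ [] := by
    intro hnil
    have := hlin (height.getD (height.length - 1) 0)
    rw [hnil, scanOpt_top height _ _ _ le_rfl] at this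
    simp [linFind] at this
  obtain ⟨q, hq⟩ : ∃ q, recs.getLast? = some q := by
    cases hrl : recs.getLast? with
    | none => exact absurd (List.getLast?_eq_none_iff.mp hrl) hne
    | some q => exact ⟨q, rfl⟩
  have hqmem : q ∈ recs := List.mem_of_getLast? hq
  have hidxlt : idx < height.length - 1 := by omega
  by_cases hc : height.getD idx 0 > q.1
  · -- append branch
    have hstep : stepRec height recs idx = recs ++ [(height.getD idx 0, idx)] := by
      simp only [stepRec, hq, Option.all_some, decide_eq_true hc, if_true]
    rw [hstep]
    have hallq : ∀ p ∈ recs, p.1 < height.getD idx 0 := by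
      intro p hp
      exact lt_of_le_of_lt (hlast p hp q hq) hc
    refine ⟨?_, ?_, ?_⟩
    · intro h
      have happ : linFind (recs ++ [(height.getD idx 0, idx)]) h
          = (linFind recs h).or (if h ≤ height.getD idx 0 then some idx else none) := by
        simp only [linFind, List.find?_append, Option.map_or]
        by_cases hh : h ≤ height.getD idx 0
        · simp only [List.find?, decide_eq_true hh, Option.map_some, if_pos hh]
        · simp only [List.find?, decide_eq_false hh, Option.map_none, if_neg hh]
      rw [happ, hlin h, scanOpt_bottom height h _ idx hidxlt]
    · rw [List.pairwise_append]
      exact ⟨hpw, by simp, by simpa using hallq⟩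
    · intro p hp q' hq'
      rw [List.getLast?_concat] at hq'
      cases hq'
      rcases List.mem_append.mp hp with hp | hp
      · exact le_of_lt (hallq p hp)
      · simp only [List.mem_singleton] at hp; rw [hp]

  · -- no-append branch
    have hstep : stepRec height recs idx = recs := by
      simp only [stepRec, hq, Option.all_some, decide_eq_false hc, Bool.false_eq_true, if_false]
    rw [hstep]
    refine ⟨?_, hpw, hlast⟩
    intro h
    rw [scanOpt_bottom height h _ idx hidxlt, ← hlin h]
    cases hfind : linFind recs h with
    | some r => simp
    | none =>
      have hall := (linFind_eq_none_iff recs h).mp hfind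
      have hnle : ¬ h ≤ height.getD idx 0 := by
        have := hall q hqmem
        omega
      simp only [Option.none_or, if_neg hnle]

lemma inv_buildRecs (height : List Int) (hn : height.length ≠ 0) :
    RecInv height 0 (buildRecs height) := by
  have key : ∀ k, 1 ≤ k → k ≤ height.length →
      RecInv height (height.length - k)
        (((List.range' (height.length - k) k).reverse).foldl (stepRec height) []) := by
    intro k
    induction k with
    | zero => intro h1 _; omega
    | succ k ih =>
      intro _ _hk
      rcases Nat.eq_zero_or_pos k with hk0 | hkpos
      · subst hk0
        have hr : List.range' (height.length - 1) 1 = [height.length - 1] := by simp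
        rw [hr]
        simpa using inv_base height hn
      · have hsplit : List.range' (height.length - (k + 1)) (k + 1)
            = (height.length - (k + 1)) :: List.range' (height.length - k) k := by
          rw [List.range'_succ,
            show height.length - (k + 1) + 1 = height.length - k from by omega]
        rw [hsplit, List.reverse_cons, List.foldl_append]
        simp only [List.foldl_cons, List.foldl_nil]
        have e : height.length - k = (height.length - (k + 1)) + 1 := by omega
        have hInv := ih (by omega) (by omega)
        revert hInv
        generalize ((List.range' (height.length - k) k).reverse).foldl (stepRec height) [] = recs0
        intro hInv
        rw [e] at hInv
        exact inv_step height _ _ (by omega) hInv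
  have h2 := key height.length (by omega) le_rfl
  have e0 : height.length - height.length = 0 := by omega
  rw [e0] at h2
  unfold buildRecs
  rw [List.range_eq_range']
  exact h2

lemma bs_correct (recs : List (Int × Nat)) (h : Int) (k : Nat) (_hk : k < recs.length)
    (hsorted : recs.Pairwise (fun p q => p.1 < q.1))
    (hkge : h ≤ (recs.getD k (0, 0)).1)
    (hfirst : ∀ j, j < k → ¬ h ≤ (recs.getD j (0, 0)).1) :
    ∀ lo hi, lo ≤ k → k ≤ hi → hi < recs.length → bs recs h lo hi = k := by
  have mono : ∀ i j : Nat, i < j → j < recs.length →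
      (recs.getD i (0, 0)).1 < (recs.getD j (0, 0)).1 := by
    intro i j hij hj
    have hi : i < recs.length := lt_trans hij hj
    rw [List.getD_eq_getElem _ _ hi, List.getD_eq_getElem _ _ hj]
    exact List.pairwise_iff_get.mp hsorted ⟨i, hi⟩ ⟨j, hj⟩ hij
  suffices H : ∀ d lo hi, hi - lo ≤ d → lo ≤ k → k ≤ hi → hi < recs.length →
      bsAux recs h d lo hi = k by
    intro lo hi hlok hkhi hhilen
    exact H (hi - lo) lo hi le_rfl hlok hkhi hhilen
  intro d
  induction d with
  | zero =>
    intro lo hi hd hlok hkhi hhilen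
    simp only [bsAux]
    omega
  | succ d ih =>
    intro lo hi hd hlok hkhi hhilen
    rw [bsAux]
    by_cases hlt : lo < hi
    · rw [if_pos hlt]
      dsimp only
      by_cases hcm : h ≤ (recs.getD ((lo + hi) / 2) (0, 0)).1
      · rw [if_pos hcm]
        have hkm : k ≤ (lo + hi) / 2 := by
          by_contra hkm
          exact hfirst ((lo + hi) / 2) (by omega) hcm
        exact ih lo ((lo + hi) / 2) (by omega) hlok hkm (by omega)
      · rw [if_neg hcm]
        have hkm : (lo + hi) / 2 < k := by
          by_contra hkm
          have hkm2 : k ≤ (lo + hi) / 2 := by omega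
          rcases Nat.eq_or_lt_of_le hkm2 with he | hlt2
          · exact hcm (he ▸ hkge)
          · exact hcm (le_of_lt (lt_of_le_of_lt hkge (mono k ((lo + hi) / 2) hlt2 (by omega))))
        exact ih ((lo + hi) / 2 + 1) hi (by omega) (by omega) hkhi hhilen
    · rw [if_neg hlt]
      omega

lemma area_index_eq (height : List Int) (i : Nat) (hi : i < height.length) :
    ((buildRecs height).getD
        (bs (buildRecs height) (height.getD i 0) 0 ((buildRecs height).length - 1)) (0, 0)).2
      = findFar height (height.getD i 0) (height.length - 1) := by
  have hn : height.length ≠ 0 := by omega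
  obtain ⟨hlin, hpw, hlast⟩ := inv_buildRecs height hn
  have hsome : (scanOpt height (height.getD i 0) 0 (height.length - 1)).isSome :=
    scanOpt_isSome height (height.getD i 0) i le_rfl (height.length - 1) (by omega)
  obtain ⟨r, hr⟩ := Option.isSome_iff_exists.mp hsome
  have hfind : linFind (buildRecs height) (height.getD i 0) = some r := by
    rw [hlin (height.getD i 0), hr]
  obtain ⟨p, hps, hpr⟩ : ∃ p, (buildRecs height).find? (fun p => decide (height.getD i 0 ≤ p.1)) = some p ∧ p.2 = r := by
    cases hf : (buildRecs height).find? (fun p => decide (height.getD i 0 ≤ p.1)) with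
    | none => rw [linFind, hf] at hfind; cases hfind
    | some p => rw [linFind, hf] at hfind; exact ⟨p, rfl, by simpa using hfind⟩
  obtain ⟨hpP, kk, hklen, hkget, hkfirst⟩ := List.find?_eq_some_iff_getElem.mp hps
  have hbs : bs (buildRecs height) (height.getD i 0) 0 ((buildRecs height).length - 1) = kk := by
    refine bs_correct (buildRecs height) (height.getD i 0) kk hklen hpw ?_ ?_ 0
      ((buildRecs height).length - 1) (by omega) (by omega) (by omega)
    · rw [List.getD_eq_getElem _ _ hklen, hkget]
      exact of_decide_eq_true hpP
    · intro j hj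
      have hjlen : j < (buildRecs height).length := lt_trans hj hklen
      rw [List.getD_eq_getElem _ _ hjlen]
      simpa using hkfirst j hj
  rw [hbs, List.getD_eq_getElem _ _ hklen, hkget, hpr]
  exact (scanOpt_findFar height (height.getD i 0) _ r hr).symm

-- ===== VERDICT (by name: the statement is the Claim_ definition above) =====
theorem newMaxArea_spec : Claim_equal_newMaxArea := by
  unfold Claim_equal_newMaxArea
  intro height _
  unfold Spec_newMaxArea newMaxArea newMaxArea_alt
  rw [PySem.List.enumerate_eq_map_pyRange (d := 0), PySem.List.pyRange_one]
  simp only [sub_zero, PySem.List.len, Int.toNat_natCast, List.map_map, List.foldl_map]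
  refine PySem.List.foldl_congr_mem _ _ _ _ ?_
  intro acc x hx
  have hxlt : x < height.length := List.mem_range.mp hx
  simp only [Function.comp_apply, zero_add, PySem.List.pyGetD_natCast]
  rw [area_index_eq height x hxlt]
  by_cases hcmp : acc > height.getD x 0 * ((findFar height (height.getD x 0) (height.length - 1) : Int) - (x : Int))
  · rw [if_pos hcmp, if_neg (by omega)]
  · rw [if_neg hcmp]
    by_cases heq : height.getD x 0 * ((findFar height (height.getD x 0) (height.length - 1) : Int) - (x : Int)) > acc
    · rw [if_pos heq]
    · rw [if_neg heq]
      omega
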